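-- pv_equiv track=rewrite | github.com/Temyaroslav/MDS2020 | ADS/solutions/lines.py | find_max_same_color_block
-- ===== SOURCE A (Python) =====
-- def find_max_same_color_block(a):
--     block_start = 0
--     max_block_start, max_block_end = 0, 0
--     for i in range(len(a)):
--         if a[block_start] != a[i]:
--             if i - block_start > max_block_end - max_block_start:
--                 max_block_start = block_start
--                 max_block_end = i
--             block_start = i
--     return max_block_start, max_block_end
-- ===== SOURCE B (Python) =====
-- def find_max_same_color_block(a):
--     # Run-boundary decomposition: candidate blocks are consecutive boundary pairs.
--     # (Like the original, the final run is never a candidate.)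
--     points = [0] + [i for i in range(1, len(a)) if a[i] != a[i - 1]]
--     best = (0, 0)
--     for s, e in zip(points, points[1:]):
--         if e - s > best[1] - best[0]:
--             best = (s, e)
--     return best
-- ===== Notes on version B (the rewrite author's own statement) =====
-- stated objective: alternative
-- what changed: B first computes the list of run boundaries, then scans consecutive boundary pairs for the widest block, instead of A's single index loop carrying block_start/max state.
import Mathlib
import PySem

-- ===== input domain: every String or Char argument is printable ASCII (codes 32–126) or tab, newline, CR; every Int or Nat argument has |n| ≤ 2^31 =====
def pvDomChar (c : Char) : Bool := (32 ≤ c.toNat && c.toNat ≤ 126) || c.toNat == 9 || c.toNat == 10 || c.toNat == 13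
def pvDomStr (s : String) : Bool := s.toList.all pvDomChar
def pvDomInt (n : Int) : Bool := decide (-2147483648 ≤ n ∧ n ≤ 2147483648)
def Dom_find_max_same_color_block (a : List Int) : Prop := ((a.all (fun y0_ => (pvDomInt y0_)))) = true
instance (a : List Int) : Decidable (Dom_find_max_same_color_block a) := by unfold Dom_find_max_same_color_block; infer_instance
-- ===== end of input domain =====

-- B replaces A's single stateful index loop by a run-boundary decomposition: it first
-- lists the indices where the value changes, then scans consecutive boundary pairs.
-- Both programs are total; indices are kept as Nat (all Python indices here are
-- provably in range and non-negative, so `getD … 0` is exact).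

-- ===== PORT A =====
-- loop body of A: state (block_start, max_block_start, max_block_end)
def pvStepA (a : List Int) (s : Nat × Nat × Nat) (i : Nat) : Nat × Nat × Nat :=
  if a.getD s.1 0 ≠ a.getD i 0 then
    if i - s.1 > s.2.2 - s.2.1 then (i, s.1, i) else (i, s.2.1, s.2.2)
  else s

def find_max_same_color_block (a : List Int) : Int × Int :=
  let st := (List.range a.length).foldl (pvStepA a) (0, 0, 0)
  ((st.2.1 : Int), (st.2.2 : Int))

-- ===== PORT B =====
-- loop body of B: best-so-far pair vs candidate boundary pair (s, e)
def pvStepB (b : Nat × Nat) (p : Nat × Nat) : Nat × Nat :=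
  if p.2 - p.1 > b.2 - b.1 then p else b

-- `range(1, len a)` is ported as `filter (0 < i)` over `range (len a)`, same elements.
def find_max_same_color_block_alt (a : List Int) : Int × Int :=
  let points : List Nat := 0 ::
    (List.range a.length).filter (fun i => decide (0 < i) && decide (a.getD i 0 ≠ a.getD (i - 1) 0))
  let best := (points.zip points.tail).foldl pvStepB (0, 0)
  ((best.1 : Int), (best.2 : Int))

-- ===== PRECONDITION & SPEC =====
def Spec_find_max_same_color_block (a : List Int) (out : Int × Int) : Prop := out = find_max_same_color_block_alt a
instance (a : List Int) (out : Int × Int) : Decidable (Spec_find_max_same_color_block a out) := by unfold Spec_find_max_same_color_block; infer_instance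

-- ===== CLAIM (what is proved, stated in full; the proofs are below) =====
def Claim_equal_find_max_same_color_block : Prop := ∀ (a : List Int), Dom_find_max_same_color_block a → Spec_find_max_same_color_block a (find_max_same_color_block a)

-- ===== LEMMAS AND PROOFS =====

-- boundaries of a strictly below k
def pvBnds (a : List Int) (k : Nat) : List Nat :=
  (List.range k).filter (fun i => decide (0 < i) && decide (a.getD i 0 ≠ a.getD (i - 1) 0))

def pvPts (a : List Int) (k : Nat) : List Nat := 0 :: pvBnds a k

def pvBest (pts : List Nat) : Nat × Nat := (pts.zip pts.tail).foldl pvStepB (0, 0)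

lemma pairs_append_singleton (l : List Nat) (x : Nat) (h : l ≠ []) :
    (l ++ [x]).zip (l ++ [x]).tail = l.zip l.tail ++ [(l.getLastD 0, x)] := by
  induction l with
  | nil => exact absurd rfl h
  | cons a t ih =>
    cases t with
    | nil => simp
    | cons b t' =>
      have := ih (by simp)
      simp only [List.cons_append, List.zip_cons_cons, List.tail_cons] at *
      simp [this, List.getLastD]

lemma pvBest_append (l : List Nat) (x : Nat) (h : l ≠ []) :
    pvBest (l ++ [x]) = pvStepB (pvBest l) (l.getLastD 0, x) := by
  simp [pvBest, pairs_append_singleton l x h, List.foldl_append]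

lemma getLastD_concat' (l : List Nat) (x : Nat) : (l ++ [x]).getLastD 0 = x := by
  induction l with
  | nil => rfl
  | cons a t ih => cases t <;> simpa [List.getLastD] using ih

-- the invariant: after processing i = 0..k-1, A's state is (last boundary, best of
-- boundary pairs below k), and a[block_start] = a[k-1]
lemma pv_inv (a : List Int) : ∀ k, 1 ≤ k → k ≤ a.length →
    (List.range k).foldl (pvStepA a) (0, 0, 0) =
      ((pvPts a k).getLastD 0, pvBest (pvPts a k)) ∧
    a.getD ((pvPts a k).getLastD 0) 0 = a.getD (k - 1) 0 := by
  intro k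
  induction k with
  | zero => intro h; omega
  | succ k ih =>
    intro _ hk
    by_cases hk1 : 1 ≤ k
    · obtain ⟨hst, hrun⟩ := ih hk1 (by omega)
      have hrange : List.range (k + 1) = List.range k ++ [k] := by
        simp [List.range_succ]
      by_cases hb : a.getD k 0 ≠ a.getD (k - 1) 0
      · -- boundary at k
        have hb' : ¬ (a[k]?.getD 0 = a[k - 1]?.getD 0) := by
          simpa [List.getD] using hb
        have hpts : pvPts a (k + 1) = pvPts a k ++ [k] := by
          simp only [pvPts, pvBnds, List.range_succ, List.filter_append]
          simp [List.getD]
          exact ⟨hk1, hb'⟩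
        have hne : pvPts a k ≠ [] := by simp [pvPts]
        have hcond : a.getD ((pvPts a k).getLastD 0) 0 ≠ a.getD k 0 := by
          rw [hrun]; exact fun h => hb h.symm
        constructor
        · rw [hrange, List.foldl_append, hst]
          simp only [List.foldl_cons, List.foldl_nil]
          rw [hpts, pvBest_append (pvPts a k) k hne, getLastD_concat']
          simp only [pvStepA, pvStepB, ne_eq, hcond, not_false_eq_true, if_pos]
          split_ifs <;> rfl
        · rw [hpts, getLastD_concat']; simp
      · -- no boundary at k : a[k] = a[k-1]
        push_neg at hb
        have hb' : a[k]?.getD 0 = a[k - 1]?.getD 0 := by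
          simpa [List.getD] using hb
        have hpts : pvPts a (k + 1) = pvPts a k := by
          simp only [pvPts, pvBnds, List.range_succ, List.filter_append]
          simp [List.getD]
          intro _; exact hb'
        have hcond : ¬ a.getD ((pvPts a k).getLastD 0) 0 ≠ a.getD k 0 := by
          rw [hrun, hb]; simp
        constructor
        · rw [hrange, List.foldl_append, hst, hpts]
          simp only [List.foldl_cons, List.foldl_nil, pvStepA]
          rw [if_neg hcond]
        · rw [hpts, Nat.add_sub_cancel, hrun]
          exact hb.symm
    · -- k = 0, so k + 1 = 1: first iteration, i = 0
      have hk0 : k = 0 := by omega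
      subst hk0
      constructor
      · simp [List.range_succ, pvStepA, pvPts, pvBnds, pvBest]
      · simp [pvPts, pvBnds]

-- ===== VERDICT (by name: the statement is the Claim_ definition above) =====
theorem find_max_same_color_block_spec : Claim_equal_find_max_same_color_block := by
  intro a _
  unfold Spec_find_max_same_color_block find_max_same_color_block find_max_same_color_block_alt
  by_cases h : a.length = 0
  · simp [h, pvBest]
  · have h1 : 1 ≤ a.length := by omega
    obtain ⟨hst, -⟩ := pv_inv a a.length h1 le_rfl
    simp only [hst]
    rfl
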